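-- pv_equiv track=rewrite | github.com/Vika-Koval/Forscher-ai-research | week2_cms/aliens_and_iq/statistic/statistic.py | rescue_people
-- ===== SOURCE A (Python) =====
-- from collections import OrderedDict
--
-- def rescue_people(smarties, limit_iq):
--     '''
--     (dict,int)->tuple
--     The function returns a tuple of the number of required trips and a list of lists,
--     where each inner list represents a trip and contains the names of the people
--     transported on that trip in the order in which they were chosen by the aliens.
--     >>> rescue_people({"Albert Einstein": 160, "Sir Isaac Newton": 195, "Nikola Tesla": 189},500)
--     (2, [['Sir Isaac Newton', 'Nikola Tesla'], ['Albert Einstein']])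
--     '''
--     limit_iq1=limit_iq
--     lst1=[]
--     lst2=[]
--     smarties = {k: v for k, v in smarties.items() if v >= 130}
--     if not smarties:
--         return 0, []
--     smarties = OrderedDict(sorted(smarties.items(), key=lambda x: (-x[1], x[0])))
--     aaa1 = max(smarties.values())
--     if limit_iq < aaa1:
--         return 0, []
--     while smarties:
--         lst1 = []
--         remaining_iq = limit_iq1
--         for key, value in list(smarties.items()):
--             if value <= remaining_iq:
--                 lst1.append(key)
--                 remaining_iq -= value
--                 smarties.pop(key)
--         if not lst1:
--             break
--         lst2.append(lst1)
--     return len(lst2), lst2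
-- ===== SOURCE B (Python) =====
-- def rescue_people(smarties, limit_iq):
--     eligible = [(k, v) for k, v in smarties.items() if v >= 130]
--     if not eligible:
--         return 0, []
--     if max(v for _, v in eligible) > limit_iq:
--         return 0, []
--     eligible.sort(key=lambda p: (-p[1], p[0]))
--     # first-fit: one pass, each person goes to the first trip with enough room
--     trips = []  # each entry: [names, remaining_capacity]
--     for name, iq in eligible:
--         for trip in trips:
--             if iq <= trip[1]:
--                 trip[0].append(name)
--                 trip[1] -= iq
--                 break
--         else:
--             trips.append([[name], limit_iq - iq])
--     return len(trips), [t[0] for t in trips]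
-- ===== Notes on version B (the rewrite author's own statement) =====
-- stated objective: alternative
-- what changed: A repeatedly re-scans a shrinking OrderedDict, one full pass per trip (popping taken people); B makes a single first-fit pass over the sorted list, keeping all open trips with their remaining capacities and putting each person into the first trip that still fits them.
import Mathlib
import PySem

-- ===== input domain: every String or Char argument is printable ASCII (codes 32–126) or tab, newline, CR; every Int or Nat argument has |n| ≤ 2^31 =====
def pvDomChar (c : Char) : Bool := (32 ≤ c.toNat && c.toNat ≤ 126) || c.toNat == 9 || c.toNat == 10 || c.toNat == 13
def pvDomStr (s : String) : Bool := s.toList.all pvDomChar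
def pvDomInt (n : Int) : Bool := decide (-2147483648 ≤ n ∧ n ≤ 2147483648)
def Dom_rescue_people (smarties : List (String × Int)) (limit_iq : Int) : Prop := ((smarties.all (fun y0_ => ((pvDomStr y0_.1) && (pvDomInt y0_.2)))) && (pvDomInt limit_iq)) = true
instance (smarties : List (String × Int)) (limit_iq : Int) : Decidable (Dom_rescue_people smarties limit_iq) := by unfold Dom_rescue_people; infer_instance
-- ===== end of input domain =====

-- B replaces A's repeated passes over a shrinking dict (one pass per trip) by a single
-- first-fit pass over the sorted list that maintains all open trips with their remaining
-- capacities; objective: alternative decomposition (same results, one traversal instead of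
-- one per trip).

-- ===== PORT A =====
-- one pass of A's inner for-loop: scan the remaining people with the pass's remaining_iq,
-- returning (names taken this pass, people left for later passes, in order)
def passA (rem : Int) : List (String × Int) → List String × List (String × Int)
  | [] => ([], [])
  | (k, v) :: rest =>
      if v ≤ rem then
        let r := passA (rem - v) rest
        (k :: r.1, r.2)
      else
        let r := passA rem rest
        (r.1, (k, v) :: r.2)

theorem passA_length (rem : Int) (L : List (String × Int)) :
    (passA rem L).1.length + (passA rem L).2.length = L.length := by
  induction L generalizing rem with
  | nil => simp [passA]
  | cons h t ih =>
      obtain ⟨k, v⟩ := h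
      by_cases hv : v ≤ rem
      · have := ih (rem - v)
        simp [passA, hv]
        omega
      · have := ih rem
        simp [passA, hv]
        omega

-- A's while-loop: keep making passes until no one is taken (or no one is left)
def loopA (limit : Int) (L : List (String × Int)) : List (List String) :=
  if L = [] then []
  else
    let r := passA limit L
    if hr : r.1 = [] then [] else r.1 :: loopA limit r.2
  termination_by L.length
  decreasing_by
    have hlen := passA_length limit L
    have h1 : (passA limit L).1.length ≠ 0 := fun h0 =>
      hr (List.eq_nil_of_length_eq_zero h0)
    omega

def rescue_people (smarties : List (String × Int)) (limit_iq : Int) : Int × List (List String) :=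
  -- {k: v for k, v in smarties.items() if v >= 130}  (input dict: keys already unique)
  let d := smarties.filter (fun p => decide (130 ≤ p.2))
  if d = [] then (0, [])
  else
    -- OrderedDict(sorted(smarties.items(), key=lambda x: (-x[1], x[0])))
    let s := PySem.List.sorted2 d (fun p => -p.2) (fun p => p.1) false
    -- aaa1 = max(smarties.values())
    match PySem.List.max? (s.map Prod.snd) (fun x => x) with
    | none => (0, [])  -- unreachable: s is nonempty
    | some m =>
        if limit_iq < m then (0, [])
        else
          let trips := loopA limit_iq s
          ((trips.length : Int), trips)

-- ===== PORT B =====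
-- put one person into the first trip with enough remaining capacity, else open a new trip
def placeB (limit : Int) (name : String) (iq : Int) : List (List String × Int) → List (List String × Int)
  | [] => [([name], limit - iq)]
  | (t, c) :: rest =>
      if iq ≤ c then (t ++ [name], c - iq) :: rest
      else (t, c) :: placeB limit name iq rest

def rescue_people_alt (smarties : List (String × Int)) (limit_iq : Int) : Int × List (List String) :=
  let d := smarties.filter (fun p => decide (130 ≤ p.2))
  if d = [] then (0, [])
  else
    match PySem.List.max? (d.map Prod.snd) (fun x => x) with
    | none => (0, [])  -- unreachable: d is nonempty
    | some m =>
        if m > limit_iq then (0, [])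
        else
          let s := PySem.List.sorted2 d (fun p => -p.2) (fun p => p.1) false
          let trips := s.foldl (fun acc p => placeB limit_iq p.1 p.2 acc) []
          ((trips.length : Int), trips.map Prod.fst)

-- ===== PRECONDITION & SPEC =====
def Spec_rescue_people (smarties : List (String × Int)) (limit_iq : Int) (out : Int × List (List String)) : Prop := out = rescue_people_alt smarties limit_iq
instance (smarties : List (String × Int)) (limit_iq : Int) (out : Int × List (List String)) : Decidable (Spec_rescue_people smarties limit_iq out) := by unfold Spec_rescue_people; infer_instance

-- ===== CLAIM (what is proved, stated in full; the proofs are below) =====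
def Claim_equal_rescue_people : Prop := ∀ (smarties : List (String × Int)) (limit_iq : Int), Dom_rescue_people smarties limit_iq → Spec_rescue_people smarties limit_iq (rescue_people smarties limit_iq)

-- ===== LEMMAS AND PROOFS =====

-- remaining capacity of a trip of initial capacity `rem` after one of A's passes over L
def capA (rem : Int) : List (String × Int) → Int
  | [] => rem
  | (_, v) :: rest => if v ≤ rem then capA (rem - v) rest else capA rem rest

theorem passA_mem (rem : Int) (L : List (String × Int)) :
    ∀ p ∈ (passA rem L).2, p ∈ L := by
  induction L generalizing rem with
  | nil => simp [passA]
  | cons h t ih =>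
      obtain ⟨k, v⟩ := h
      intro p hp
      by_cases hv : v ≤ rem
      · simp only [passA, if_pos hv] at hp
        exact List.mem_cons_of_mem _ (ih _ _ hp)
      · simp only [passA, if_neg hv] at hp
        rcases List.mem_cons.mp hp with hp | hp
        · simp [hp]
        · exact List.mem_cons_of_mem _ (ih _ _ hp)

-- the key decomposition: running the first-fit fold with an open trip (t1, c1) in front
-- fills t1 with exactly the people one of A's passes (capacity c1) would take, and the
-- people that pass skips are processed, in order, against the remaining trips
theorem ff_decomp (limit : Int) (L : List (String × Int)) :
    ∀ (t1 : List String) (c1 : Int) (rest : List (List String × Int)),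
      L.foldl (fun acc p => placeB limit p.1 p.2 acc) ((t1, c1) :: rest)
        = (t1 ++ (passA c1 L).1, capA c1 L)
            :: (passA c1 L).2.foldl (fun acc p => placeB limit p.1 p.2 acc) rest := by
  induction L with
  | nil => simp [passA, capA]
  | cons h t ih =>
      intro t1 c1 rest
      obtain ⟨k, v⟩ := h
      by_cases hv : v ≤ c1
      · simp only [List.foldl_cons, placeB, if_pos hv]
        rw [ih (t1 ++ [k]) (c1 - v) rest]
        simp [passA, capA, hv]
      · simp only [List.foldl_cons, placeB, if_neg hv]
        rw [ih t1 c1 (placeB limit k v rest)]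
        simp [passA, capA, hv, List.foldl_cons]

-- A's pass-per-trip loop and B's first-fit fold build the same trips, provided every
-- remaining person fits an empty trip (v ≤ limit)
theorem loopA_eq_ff (limit : Int) (L : List (String × Int))
    (hall : ∀ p ∈ L, p.2 ≤ limit) :
    loopA limit L = (L.foldl (fun acc p => placeB limit p.1 p.2 acc) []).map Prod.fst := by
  induction hn : L.length using Nat.strong_induction_on generalizing L with
  | _ n ih =>
    match L, hall with
    | [], _ => simp [loopA]
    | (k, v) :: t, hall =>
      have hv : v ≤ limit := hall (k, v) (by simp)
      have hpass : passA limit ((k, v) :: t) =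
          (k :: (passA (limit - v) t).1, (passA (limit - v) t).2) := by
        simp [passA, hv]
      have hlen := passA_length (limit - v) t
      have hrec := ih ((passA (limit - v) t).2.length)
        (by simp at hn; omega)
        ((passA (limit - v) t).2)
        (fun p hp => hall p (List.mem_cons_of_mem _ (passA_mem _ _ p hp)))
        rfl
      rw [loopA]
      rw [if_neg (by simp)]
      simp only [hpass]
      rw [dif_neg (by simp)]
      rw [List.foldl_cons]
      simp only [placeB]
      rw [ff_decomp limit t [k] (limit - v) []]
      simp [hrec]

-- max? with the identity key picks the same value on permuted lists
theorem max?_id_perm {xs ys : List Int} (hperm : xs.Perm ys) {a b : Int}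
    (ha : PySem.List.max? xs (fun x => x) = some a)
    (hb : PySem.List.max? ys (fun x => x) = some b) : a = b := by
  have hma : a ∈ xs := PySem.List.max?_mem ha
  have hmb : b ∈ ys := PySem.List.max?_mem hb
  have h1 : b ≤ a := PySem.List.max?_isMax ha b (hperm.mem_iff.mpr hmb)
  have h2 : a ≤ b := PySem.List.max?_isMax hb a (hperm.mem_iff.mp hma)
  omega

-- ===== VERDICT (by name: the statement is the Claim_ definition above) =====
theorem rescue_people_spec : Claim_equal_rescue_people := by
  intro smarties limit_iq _
  unfold Spec_rescue_people rescue_people rescue_people_alt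
  set d := smarties.filter (fun p => decide (130 ≤ p.2)) with hd
  by_cases hde : d = []
  · simp [hde]
  · simp only [if_neg hde]
    set s := PySem.List.sorted2 d (fun p => -p.2) (fun p => p.1) false with hs
    have hperm : s.Perm d := PySem.List.sorted2_perm ..
    have hsne : s ≠ [] := by
      intro h; exact hde (List.Perm.nil_eq (h ▸ hperm)).symm
    have hsm : s.map Prod.snd ≠ [] := by simpa using hsne
    have hdm : d.map Prod.snd ≠ [] := by simpa using hde
    obtain ⟨a, ha⟩ : ∃ a, PySem.List.max? (s.map Prod.snd) (fun x => x) = some a := by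
      cases h : PySem.List.max? (s.map Prod.snd) (fun x => x) with
      | none => exact absurd ((PySem.List.max?_eq_none_iff _ _).mp h) hsm
      | some a => exact ⟨a, rfl⟩
    obtain ⟨b, hb⟩ : ∃ b, PySem.List.max? (d.map Prod.snd) (fun x => x) = some b := by
      cases h : PySem.List.max? (d.map Prod.snd) (fun x => x) with
      | none => exact absurd ((PySem.List.max?_eq_none_iff _ _).mp h) hdm
      | some b => exact ⟨b, rfl⟩
    have hab : a = b := max?_id_perm (hperm.map Prod.snd) ha hb
    by_cases hlim : limit_iq < a
    · simp [ha, hb, ← hab, hlim]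
    · have hall : ∀ p ∈ s, p.2 ≤ limit_iq := by
        intro p hp
        have hps : p.2 ∈ s.map Prod.snd := List.mem_map_of_mem hp
        have := PySem.List.max?_isMax ha p.2 hps
        omega
      simp [ha, hb, ← hab, hlim, loopA_eq_ff limit_iq s hall]
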